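-- pv_equiv track=rewrite | github.com/gnnop/Chess960Design | deck_generator.py | generateIndividualTemplate
-- ===== SOURCE A (Python) =====
-- def deteremineLatexString(pos, piece):
--     #Here, given K Q R B N we map it to the latex string
--     pieceMap = {'K' : '\\WhiteKingOn',
--                 'Q' : '\\WhiteQueenOn',
--                 'R' : '\\WhiteRookOn',
--                 'B' : '\\WhiteBishopOn',
--                 'N' : '\\WhiteKnightOn'}
--
--     return pieceMap[piece] + ('Black' if (pos % 2 == 0) else 'White') #5050 shot of right
--
-- def generateIndividualTemplate(index, chessList):
--     #And now I create the chess setup, with a position data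
--     kingPos = -1
--     lRookPos = -1
--     rRookPos = -1
--     chessStr = '{'
--     for pos,i in enumerate(chessList):
--         if i == 'K':
--             kingPos = pos
--         if i == 'R':
--             if lRookPos == -1:
--                 lRookPos = pos
--             else:
--                 rRookPos = pos
--
--         #double duty. Also generate the chess list:
--         chessStr += str(pos)  + '/' + deteremineLatexString(pos, i)
--         if pos < 7:
--             chessStr += ','
--     chessStr += '}'
--
--     return str(index) + '/' + str(chessStr) + '/' + str(lRookPos) + '/' + str(rRookPos) + '/' + str(kingPos)
-- ===== SOURCE B (Python) =====
-- def deteremineLatexString(pos, piece):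
--     pieceMap = {'K' : '\\WhiteKingOn',
--                 'Q' : '\\WhiteQueenOn',
--                 'R' : '\\WhiteRookOn',
--                 'B' : '\\WhiteBishopOn',
--                 'N' : '\\WhiteKnightOn'}
--     return pieceMap[piece] + ('Black' if (pos % 2 == 0) else 'White')
--
-- def generateIndividualTemplate(index, chessList):
--     kings = [p for p, c in enumerate(chessList) if c == 'K']
--     rooks = [p for p, c in enumerate(chessList) if c == 'R']
--     kingPos = kings[-1] if kings else -1
--     lRookPos = rooks[0] if rooks else -1
--     rRookPos = rooks[-1] if len(rooks) > 1 else -1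
--     chessStr = '{' + ''.join(
--         str(p) + '/' + deteremineLatexString(p, c) + (',' if p < 7 else '')
--         for p, c in enumerate(chessList)) + '}'
--     return '/'.join([str(index), chessStr, str(lRookPos), str(rRookPos), str(kingPos)])
-- ===== Notes on version B (the rewrite author's own statement) =====
-- stated objective: simpler
-- what changed: Replaces the single stateful pass that interleaves position-tracking and string building with separate declarative scans (king/rook index lists with head/last selection) plus a join-based string assembly.
import Mathlib
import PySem

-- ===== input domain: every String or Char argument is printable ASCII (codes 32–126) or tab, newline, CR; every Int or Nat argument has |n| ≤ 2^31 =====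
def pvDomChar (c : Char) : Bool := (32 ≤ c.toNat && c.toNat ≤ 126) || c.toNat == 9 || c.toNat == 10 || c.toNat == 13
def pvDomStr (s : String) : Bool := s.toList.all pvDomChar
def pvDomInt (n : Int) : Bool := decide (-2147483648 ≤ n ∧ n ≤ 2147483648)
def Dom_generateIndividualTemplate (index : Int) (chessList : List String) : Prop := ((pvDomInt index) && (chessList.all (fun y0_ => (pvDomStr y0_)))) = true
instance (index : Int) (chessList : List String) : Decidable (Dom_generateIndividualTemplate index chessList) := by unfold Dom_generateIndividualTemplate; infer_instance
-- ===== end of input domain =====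

-- B replaces A's single stateful pass (positions tracked and string built together) by separate
-- declarative scans for the king/rook indices plus a join-based string assembly (objective: simpler).

-- ===== PORT A =====
def pieceMap : PySem.Dict String String :=
  PySem.Dict.ofList [("K", "\\WhiteKingOn"), ("Q", "\\WhiteQueenOn"),
                     ("R", "\\WhiteRookOn"), ("B", "\\WhiteBishopOn"), ("N", "\\WhiteKnightOn")]

-- pieceMap[piece] raises KeyError outside the map (excluded by Pre_); get?.getD "" totalizes it there
def deteremineLatexString (pos : Int) (piece : String) : String :=
  ((pieceMap.get? piece).getD "") ++ (if PySem.Int.mod pos 2 == 0 then "Black" else "White")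

def aStep (st : Int × Int × Int × String) (pi : Int × String) : Int × Int × Int × String :=
  let kingPos : Int := if pi.2 == "K" then pi.1 else st.1
  let lr : Int × Int :=
    if pi.2 == "R" then
      (if st.2.1 == -1 then (pi.1, st.2.2.1) else (st.2.1, pi.1))
    else (st.2.1, st.2.2.1)
  let chessStr := st.2.2.2 ++ (PySem.Int.toStr pi.1 ++ "/" ++ deteremineLatexString pi.1 pi.2)
      ++ (if pi.1 < 7 then "," else "")
  (kingPos, lr.1, lr.2, chessStr)

def generateIndividualTemplate (index : Int) (chessList : List String) : String :=
  let st := (PySem.List.enumerate chessList).foldl aStep (-1, -1, -1, "{")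
  let chessStr := st.2.2.2 ++ "}"
  PySem.Int.toStr index ++ "/" ++ chessStr ++ "/" ++ PySem.Int.toStr st.2.1 ++ "/"
    ++ PySem.Int.toStr st.2.2.1 ++ "/" ++ PySem.Int.toStr st.1

-- ===== PORT B =====
def generateIndividualTemplate_alt (index : Int) (chessList : List String) : String :=
  let en := PySem.List.enumerate chessList
  let kings := (en.filter (fun pc => pc.2 == "K")).map Prod.fst
  let rooks := (en.filter (fun pc => pc.2 == "R")).map Prod.fst
  let kingPos := kings.getLast?.getD (-1)       -- kings[-1] if kings else -1
  let lRookPos := rooks.head?.getD (-1)         -- rooks[0] if rooks else -1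
  let rRookPos : Int := if 1 < rooks.length then rooks.getLast?.getD (-1) else -1
  let chessStr := "{" ++ PySem.Str.join ""
      (en.map (fun pc => PySem.Int.toStr pc.1 ++ "/" ++ deteremineLatexString pc.1 pc.2
                           ++ (if pc.1 < 7 then "," else ""))) ++ "}"
  PySem.Str.join "/" [PySem.Int.toStr index, chessStr, PySem.Int.toStr lRookPos,
                      PySem.Int.toStr rRookPos, PySem.Int.toStr kingPos]

-- ===== PRECONDITION & SPEC =====
-- Pre_ excludes lists containing a piece outside {K,Q,R,B,N}: there A raises KeyError in pieceMap.
def Pre_generateIndividualTemplate (index : Int) (chessList : List String) : Prop :=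
  chessList.all (fun s => s == "K" || s == "Q" || s == "R" || s == "B" || s == "N") = true
instance (index : Int) (chessList : List String) : Decidable (Pre_generateIndividualTemplate index chessList) := by unfold Pre_generateIndividualTemplate; infer_instance

def pvWitness_generateIndividualTemplate : Int × List String :=
  (0, ["R", "N", "B", "Q", "K", "B", "N", "R"])

def Spec_generateIndividualTemplate (index : Int) (chessList : List String) (out : String) : Prop := out = generateIndividualTemplate_alt index chessList
instance (index : Int) (chessList : List String) (out : String) : Decidable (Spec_generateIndividualTemplate index chessList out) := by unfold Spec_generateIndividualTemplate; infer_instance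

-- ===== CLAIM (what is proved, stated in full; the proofs are below) =====
def Claim_equal_generateIndividualTemplate : Prop := ∀ (index : Int) (chessList : List String), Dom_generateIndividualTemplate index chessList → Pre_generateIndividualTemplate index chessList → Spec_generateIndividualTemplate index chessList (generateIndividualTemplate index chessList)

-- ===== LEMMAS AND PROOFS =====

-- A's lRook/rRook update, abstracted over the list of rook positions
def rFold : Int → Int → List Int → Int × Int
  | l, r, [] => (l, r)
  | l, r, p :: ps => if l == -1 then rFold p r ps else rFold l p ps

theorem getLastD_cons (x : Int) (xs : List Int) (d : Int) :
    (x :: xs).getLast?.getD d = xs.getLast?.getD x := by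
  induction xs generalizing x d with
  | nil => simp
  | cons y ys ih => rw [List.getLast?_cons_cons, ih y d, ih y x]

theorem getLastD_irrel (xs : List Int) (h : xs ≠ []) (a b : Int) :
    xs.getLast?.getD a = xs.getLast?.getD b := by
  cases hl : xs.getLast? with
  | none => exact absurd (List.getLast?_eq_none_iff.mp hl) h
  | some z => simp

theorem rFold_ne (ps : List Int) : ∀ l r : Int, l ≠ -1 →
    rFold l r ps = (l, ps.getLast?.getD r) := by
  induction ps with
  | nil => intro l r _; simp [rFold]
  | cons p ps ih =>
    intro l r hl
    rw [rFold, if_neg (by simpa using hl), ih l p hl, getLastD_cons]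

theorem rFold_start (ps : List Int) (h : ∀ p ∈ ps, 0 ≤ p) :
    rFold (-1) (-1) ps =
      (ps.head?.getD (-1), if 1 < ps.length then ps.getLast?.getD (-1) else -1) := by
  cases ps with
  | nil => simp [rFold]
  | cons p ps =>
    have hp : (p : Int) ≠ -1 := by
      have := h p (by simp); omega
    rw [rFold, if_pos (by simp), rFold_ne ps p (-1) hp]
    cases ps with
    | nil => simp
    | cons q qs =>
      simp only [List.head?_cons, Option.getD_some, List.length_cons]
      rw [if_pos (by omega), getLastD_cons p (q :: qs) (-1),
          getLastD_irrel (q :: qs) (by simp) p (-1)]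

theorem join_empty_cons (x : String) (xs : List String) :
    PySem.Str.join "" (x :: xs) = x ++ PySem.Str.join "" xs := by
  apply String.toList_inj.mp
  cases xs with
  | nil => simp [PySem.Str.toList_join, PySem.Chars.join, List.intercalate]
  | cons y ys => simp [PySem.Str.toList_join, PySem.Chars.join, List.intercalate]

def entryStr (pc : Int × String) : String :=
  PySem.Int.toStr pc.1 ++ "/" ++ deteremineLatexString pc.1 pc.2 ++ (if pc.1 < 7 then "," else "")

theorem aFold_spec (l : List (Int × String)) : ∀ (k lr rr : Int) (s : String),
    l.foldl aStep (k, lr, rr, s) =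
      (((l.filter (fun pc => pc.2 == "K")).map Prod.fst).getLast?.getD k,
       (rFold lr rr ((l.filter (fun pc => pc.2 == "R")).map Prod.fst)).1,
       (rFold lr rr ((l.filter (fun pc => pc.2 == "R")).map Prod.fst)).2,
       s ++ PySem.Str.join "" (l.map entryStr)) := by
  induction l with
  | nil =>
    intro k lr rr s
    simp [rFold, PySem.Str.join, PySem.Chars.join, List.intercalate]
  | cons pc rest ih =>
    intro k lr rr s
    rw [List.foldl_cons, ih, List.map_cons, join_empty_cons]
    by_cases hK : pc.2 == "K" <;> by_cases hR : pc.2 == "R"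
    · exfalso
      simp only [beq_iff_eq] at hK hR
      rw [hK] at hR; exact absurd hR (by decide)
    all_goals by_cases hlr : lr == (-1 : Int) <;>
      simp [aStep, hK, hR, hlr, getLastD_cons, rFold, entryStr,
            String.append_assoc]

theorem rook_nonneg (chessList : List String) :
    ∀ p ∈ ((PySem.List.enumerate chessList).filter (fun pc => pc.2 == "R")).map Prod.fst,
      (0 : Int) ≤ p := by
  intro p hp
  simp only [List.mem_map, List.mem_filter] at hp
  obtain ⟨pc, ⟨hmem, _⟩, rfl⟩ := hp
  rw [PySem.List.mem_enumerate_iff] at hmem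
  obtain ⟨k, hk, rfl⟩ := hmem
  simp

-- ===== VERDICT (by name: the statement is the Claim_ definition above) =====
theorem generateIndividualTemplate_spec : Claim_equal_generateIndividualTemplate := by
  intro index chessList _ _
  unfold Spec_generateIndividualTemplate
  simp only [generateIndividualTemplate, generateIndividualTemplate_alt]
  rw [aFold_spec, rFold_start _ (rook_nonneg chessList)]
  have hent : entryStr = (fun pc : Int × String =>
      PySem.Int.toStr pc.1 ++ "/" ++ deteremineLatexString pc.1 pc.2
        ++ (if pc.1 < 7 then "," else "")) := rfl
  apply String.toList_inj.mp
  rw [hent]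
  simp [PySem.Str.toList_join, PySem.Chars.join, List.intercalate, List.intersperse]
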